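-- pv_equiv track=rewrite | github.com/faizanparabtani/CodeCell | Amazon.py | amazon
-- ===== SOURCE A (Python) =====
-- def amazon(a):
--     a.sort()
--     element = a[0]
--     count = a.count(a[0])
--     for i in range(1, len(a) - 1):
--         count1 = a.count(a[i])
--         if count < count1:
--             count = count1
--             element = a[i]
--         elif count1 == count:
--             if a[i] < a[i+1]:
--                 continue
--     return element
-- ===== SOURCE B (Python) =====
-- def amazon(a):
--     a.sort()  # same in-place sort as A (side effect preserved)
--     freq = {}
--     for x in a:
--         freq[x] = freq.get(x, 0) + 1
--     m = max(freq.values())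
--     return min(v for v in freq if freq[v] == m)
-- ===== Notes on version B (the rewrite author's own statement) =====
-- stated objective: faster
-- what changed: A rescans the whole list with a.count() for every index; B builds a frequency table in one pass, takes the maximum frequency, and returns the smallest value attaining it.
import Mathlib
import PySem

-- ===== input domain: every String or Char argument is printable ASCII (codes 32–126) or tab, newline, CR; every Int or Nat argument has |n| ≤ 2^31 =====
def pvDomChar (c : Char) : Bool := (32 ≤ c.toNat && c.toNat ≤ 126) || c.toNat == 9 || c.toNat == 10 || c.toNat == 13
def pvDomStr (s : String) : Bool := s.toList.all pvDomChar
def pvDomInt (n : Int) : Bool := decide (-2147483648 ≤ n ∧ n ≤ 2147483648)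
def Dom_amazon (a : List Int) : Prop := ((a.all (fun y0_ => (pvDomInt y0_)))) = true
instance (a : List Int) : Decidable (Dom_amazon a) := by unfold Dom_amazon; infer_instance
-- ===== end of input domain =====

-- B replaces A's repeated a.count() rescans by one frequency-table pass plus a max/min
-- selection over the table. A sorts its argument in place; B performs the same in-place
-- sort, and the equivalence proved here is about the return value.


-- ===== PORT A =====
-- a.sort() → PySem.List.sorted; a[i] → PySem.List.pyGetD (every index the loop reads is in
-- range, including the a[i+1] of the dead 'elif' branch, whose 'continue' leaves the state
-- unchanged: both arms of that inner 'if' are st); a.count(...) → PySem.List.count, cast to Int.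
def amazon (a : List Int) : Int :=
  let s := PySem.List.sorted a (fun x => x)
  let element := PySem.List.pyGetD s 0 0
  let count : Int := (PySem.List.count s (PySem.List.pyGetD s 0 0) : Int)
  let r := (PySem.List.pyRange 1 (PySem.List.len s - 1)).foldl
    (fun (st : Int × Int) i =>
      let count1 : Int := (PySem.List.count s (PySem.List.pyGetD s i 0) : Int)
      if st.1 < count1 then (count1, PySem.List.pyGetD s i 0)
      else if count1 == st.1 then st else st)
    (count, element)
  r.2

-- ===== PORT B =====
-- Source B: sort, build freq with 'freq[x] = freq.get(x, 0) + 1', m = max(freq.values()),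
-- return min(v for v in freq if freq[v] == m).  Under Pre_ (a ≠ []) max/min never see an
-- empty sequence, so the .getD 0 defaults are unreachable.
def amazon_alt (a : List Int) : Int :=
  let s := PySem.List.sorted a (fun x => x)
  let freq := s.foldl (fun d x => d.insert x (d.getD x 0 + 1)) (PySem.Dict.empty : PySem.Dict Int Int)
  let m := (PySem.List.max? (PySem.Dict.values freq) (fun v => v)).getD 0
  (PySem.List.min? ((PySem.Dict.keys freq).filter (fun v => PySem.Dict.getD freq v 0 == m)) (fun v => v)).getD 0

-- ===== PRECONDITION & SPEC =====
-- Pre_ excludes only the empty list: there Python A raises IndexError (a[0]) and Python B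
-- raises ValueError (max of an empty sequence).
def Pre_amazon (a : List Int) : Prop := a ≠ []
instance (a : List Int) : Decidable (Pre_amazon a) := by unfold Pre_amazon; infer_instance
def pvWitness_amazon : List Int := [3, 1, 2, 1]

def Spec_amazon (a : List Int) (out : Int) : Prop := out = amazon_alt a
instance (a : List Int) (out : Int) : Decidable (Spec_amazon a out) := by unfold Spec_amazon; infer_instance

-- ===== CLAIM (what is proved, stated in full; the proofs are below) =====
def Claim_equal_amazon : Prop := ∀ (a : List Int), Dom_amazon a → Pre_amazon a → Spec_amazon a (amazon a)

-- ===== LEMMAS AND PROOFS =====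
-- Both programs return the unique smallest element of sorted(a) of maximal multiplicity
-- (IsBest); A via its running strict-improvement fold, B via its table/max/min selection.


def cnt (s : List Int) (x : Int) : Int := (List.count x s : Int)

def stepF (s : List Int) (st : Int × Int) (x : Int) : Int × Int :=
  if st.1 < cnt s x then (cnt s x, x) else st

def runMax (s : List Int) (c : Int) (l : List Int) : Int :=
  l.foldl (fun m x => max m (cnt s x)) c

lemma runMax_le (s : List Int) (c : Int) (l : List Int) :
    c ≤ runMax s c l ∧ ∀ x ∈ l, cnt s x ≤ runMax s c l :=
  PySem.List.le_foldl_max_int l (cnt s) c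

lemma count_last_eq_one {S : List Int} {v : Int} (hp : S.Pairwise (· ≤ ·))
    (h2 : 2 ≤ S.length)
    (hv : S[S.length - 1]'(by omega) = v)
    (hlt : S[S.length - 2]'(by omega) < v) :
    List.count v S = 1 := by
  have hSne : S ≠ [] := by
    intro h; rw [h] at h2; simp at h2
  have hsplit : S.dropLast ++ [v] = S := by
    have h := List.dropLast_concat_getLast hSne
    rwa [List.getLast_eq_getElem hSne, hv] at h
  have hnotmem : v ∉ S.dropLast := by
    intro hmem
    rcases List.mem_iff_getElem.mp hmem with ⟨j, hj, hje⟩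
    have hjlen : j < S.length - 1 := by
      simpa [List.length_dropLast] using hj
    have hje' : S[j]'(by omega) = v := by
      rw [← List.getElem_dropLast]; exact hje
    have hmono : S[j]'(by omega) ≤ S[S.length - 2]'(by omega) := by
      rcases Nat.lt_or_ge j (S.length - 2) with hlt' | hge
      · exact (List.pairwise_iff_getElem.mp hp) j (S.length - 2) (by omega) (by omega) hlt'
      · have hj2 : j = S.length - 2 := by omega
        subst hj2; exact le_refl _
    rw [hje'] at hmono
    exact absurd hmono (not_le.mpr hlt)
  have h0 : List.count v S.dropLast = 0 := List.count_eq_zero.mpr hnotmem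
  conv_lhs => rw [← hsplit]
  rw [List.count_append, h0]
  simp

lemma foldl_stepF_closed (s : List Int) :
    ∀ (l : List Int) (c e M : Int), M = runMax s c l →
      l.foldl (stepF s) (c, e)
        = (M, if M ≤ c then e
              else ((l.filter (fun x => M ≤ cnt s x)).headD e) ) := by
  intro l
  induction l with
  | nil =>
    intro c e M hM
    simp only [runMax, List.foldl_nil] at hM
    simp [hM]
  | cons x t ih =>
    intro c e M hM
    have hM' : M = runMax s (max c (cnt s x)) t := hM
    have hcx : cnt s x ≤ M := by
      have := (runMax_le s (max c (cnt s x)) t).1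
      rw [← hM'] at this; exact le_trans (le_max_right _ _) this
    have hcM : c ≤ M := by
      have := (runMax_le s (max c (cnt s x)) t).1
      rw [← hM'] at this; exact le_trans (le_max_left _ _) this
    rw [List.foldl_cons]
    by_cases hx : c < cnt s x
    · rw [max_eq_right hx.le] at hM'
      have hstep : stepF s (c, e) x = (cnt s x, x) := if_pos hx
      rw [hstep, ih (cnt s x) x M hM']
      have hMc : ¬ M ≤ c := not_le.mpr (lt_of_lt_of_le hx hcx)
      rw [if_neg hMc, List.filter_cons]
      by_cases hMx : M ≤ cnt s x
      · rw [if_pos hMx, if_pos (by simpa using hMx), List.headD_cons]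
      · have hne : t.filter (fun y => decide (M ≤ cnt s y)) ≠ [] := by
          have h := PySem.List.foldl_max_mem (t.map (cnt s)) (cnt s x)
          rw [List.foldl_map] at h
          rcases h with hA | hA
          · rw [show t.foldl (fun m y => max m (cnt s y)) (cnt s x) = runMax s (cnt s x) t from rfl, ← hM'] at hA
            exact absurd hA.le hMx
          · rcases List.mem_map.mp hA with ⟨y, hy, hvv⟩
            intro hnil
            have hmem : y ∈ t.filter (fun y => decide (M ≤ cnt s y)) :=
              List.mem_filter.mpr ⟨hy, by
                simp only [decide_eq_true_eq]
                rw [show t.foldl (fun m y => max m (cnt s y)) (cnt s x) = runMax s (cnt s x) t from rfl, ← hM'] at hvv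
                exact hvv.ge⟩
            rw [hnil] at hmem; exact absurd hmem (List.not_mem_nil)
        rw [if_neg hMx, if_neg (by simpa using hMx)]
        cases hft : t.filter (fun y => decide (M ≤ cnt s y)) with
        | nil => exact absurd hft hne
        | cons z zs => rw [List.headD_cons, List.headD_cons]
    · rw [max_eq_left (not_lt.mp hx)] at hM'
      have hstep : stepF s (c, e) x = (c, e) := if_neg hx
      rw [hstep, ih c e M hM']
      by_cases hMc : M ≤ c
      · rw [if_pos hMc, if_pos hMc]
      · have hxf : ¬ M ≤ cnt s x := fun hle => hMc (le_trans hle (not_lt.mp hx))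
        rw [if_neg hMc, if_neg hMc, List.filter_cons, if_neg (by simpa using hxf)]

lemma fold_range_eq (s0 : Int) (t : List Int)
    (hp : (s0 :: t).Pairwise (· ≤ ·)) :
    ((PySem.List.pyRange 1 (PySem.List.len (s0 :: t) - 1)).foldl
        (fun st i => stepF (s0 :: t) st (PySem.List.pyGetD (s0 :: t) i 0))
        (cnt (s0 :: t) s0, s0))
      = t.foldl (stepF (s0 :: t)) (cnt (s0 :: t) s0, s0) := by
  cases t with
  | nil =>
    rw [show PySem.List.len [s0] - 1 = (0 : Int) by simp [PySem.List.len],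
      PySem.List.pyRange_one_eq_nil (by norm_num)]
    rfl
  | cons t0 t1 =>
    have hS : (s0 :: t0 :: t1).length = t1.length + 2 := by simp
    have hlenS : PySem.List.len (s0 :: t0 :: t1) = ((s0 :: t0 :: t1).length : Int) := by
      simp [PySem.List.len]
    have hconv : ∀ (R : List Int) (init : Int × Int),
        R.foldl (fun st i => stepF (s0 :: t0 :: t1) st (PySem.List.pyGetD (s0 :: t0 :: t1) i 0)) init
          = (R.map (fun i => PySem.List.pyGetD (s0 :: t0 :: t1) i 0)).foldl (stepF (s0 :: t0 :: t1)) init := by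
      intro R init; rw [List.foldl_map]
    have hfull : (PySem.List.pyRange 1 (PySem.List.len (s0 :: t0 :: t1))).foldl
        (fun st i => stepF (s0 :: t0 :: t1) st (PySem.List.pyGetD (s0 :: t0 :: t1) i 0))
        (cnt (s0 :: t0 :: t1) s0, s0)
        = (t0 :: t1).foldl (stepF (s0 :: t0 :: t1)) (cnt (s0 :: t0 :: t1) s0, s0) := by
      have h := PySem.List.foldl_pyRange_pyGetD (s0 :: t0 :: t1) 0
        (stepF (s0 :: t0 :: t1)) (cnt (s0 :: t0 :: t1) s0, s0) (a := 1) (by norm_num)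
      simpa using h
    have hb : (1 : Int) ≤ PySem.List.len (s0 :: t0 :: t1) - 1 := by
      rw [hlenS, hS]; push_cast; omega
    have hsplit : PySem.List.pyRange 1 (PySem.List.len (s0 :: t0 :: t1))
        = PySem.List.pyRange 1 (PySem.List.len (s0 :: t0 :: t1) - 1)
            ++ [PySem.List.len (s0 :: t0 :: t1) - 1] := by
      have h := PySem.List.pyRange_one_succ_right (a := 1)
        (b := PySem.List.len (s0 :: t0 :: t1) - 1) hb
      rw [show PySem.List.len (s0 :: t0 :: t1) - 1 + 1 = PySem.List.len (s0 :: t0 :: t1) by ring] at h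
      exact h
    -- value at the last index
    have hlast_val : PySem.List.pyGetD (s0 :: t0 :: t1) (PySem.List.len (s0 :: t0 :: t1) - 1) 0
        = (s0 :: t0 :: t1)[(s0 :: t0 :: t1).length - 1]'(by omega) := by
      rw [hlenS]
      rw [PySem.List.pyGetD_eq_getElem (s0 :: t0 :: t1) 0
        (by omega) (by omega)]
      congr 1
      omega
    -- last step of the fold is a no-op
    have hnoop : stepF (s0 :: t0 :: t1)
        ((PySem.List.pyRange 1 (PySem.List.len (s0 :: t0 :: t1) - 1)).foldl
          (fun st i => stepF (s0 :: t0 :: t1) st (PySem.List.pyGetD (s0 :: t0 :: t1) i 0))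
          (cnt (s0 :: t0 :: t1) s0, s0))
        (PySem.List.pyGetD (s0 :: t0 :: t1) (PySem.List.len (s0 :: t0 :: t1) - 1) 0)
        = (PySem.List.pyRange 1 (PySem.List.len (s0 :: t0 :: t1) - 1)).foldl
          (fun st i => stepF (s0 :: t0 :: t1) st (PySem.List.pyGetD (s0 :: t0 :: t1) i 0))
          (cnt (s0 :: t0 :: t1) s0, s0) := by
      rw [hconv]
      rw [foldl_stepF_closed (s0 :: t0 :: t1) _ (cnt (s0 :: t0 :: t1) s0) s0 _ rfl]
      apply if_neg
      rw [not_lt, hlast_val]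
      -- goal: cnt S S[n-1] ≤ runMax S c0 (mapped range)
      have hrm := runMax_le (s0 :: t0 :: t1) (cnt (s0 :: t0 :: t1) s0)
        ((PySem.List.pyRange 1 (PySem.List.len (s0 :: t0 :: t1) - 1)).map
          (fun i => PySem.List.pyGetD (s0 :: t0 :: t1) i 0))
      by_cases hcase : (s0 :: t0 :: t1)[(s0 :: t0 :: t1).length - 2]'(by omega)
          < (s0 :: t0 :: t1)[(s0 :: t0 :: t1).length - 1]'(by omega)
      · have h1 : List.count ((s0 :: t0 :: t1)[(s0 :: t0 :: t1).length - 1]'(by omega)) (s0 :: t0 :: t1) = 1 :=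
          count_last_eq_one hp (by omega) rfl hcase
        have hc0 : (1 : Int) ≤ cnt (s0 :: t0 :: t1) s0 := by
          unfold cnt
          have : 0 < List.count s0 (s0 :: t0 :: t1) := List.count_pos_iff.mpr (by simp)
          omega
        calc cnt (s0 :: t0 :: t1) ((s0 :: t0 :: t1)[(s0 :: t0 :: t1).length - 1]'(by omega))
            = 1 := by unfold cnt; rw [h1]; rfl
          _ ≤ cnt (s0 :: t0 :: t1) s0 := hc0
          _ ≤ _ := hrm.1
      · -- S[n-1] = S[n-2]
        have hle : (s0 :: t0 :: t1)[(s0 :: t0 :: t1).length - 2]'(by omega)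
            ≤ (s0 :: t0 :: t1)[(s0 :: t0 :: t1).length - 1]'(by omega) :=
          (List.pairwise_iff_getElem.mp hp) _ _ (by omega) (by omega) (by omega)
        have heq : (s0 :: t0 :: t1)[(s0 :: t0 :: t1).length - 1]'(by omega)
            = (s0 :: t0 :: t1)[(s0 :: t0 :: t1).length - 2]'(by omega) :=
          le_antisymm (not_lt.mp hcase) hle
        rw [heq]
        cases t1 with
        | nil =>
          -- length 2 : S[0] = s0
          have : (s0 :: t0 :: ([] : List Int))[(s0 :: t0 :: ([] : List Int)).length - 2]'(by omega) = s0 := by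
            simp
          rw [this]
          exact hrm.1
        | cons u us =>
          -- length ≥ 3 : index n-2 is inside the range
          have hmem : ((s0 :: t0 :: u :: us).length : Int) - 2
              ∈ PySem.List.pyRange 1 (PySem.List.len (s0 :: t0 :: u :: us) - 1) := by
            rw [hlenS]
            apply PySem.List.mem_pyRange_one.mpr
            refine ⟨by simp only [List.length_cons]; omega,
              by simp only [List.length_cons]; omega⟩
          have hval : PySem.List.pyGetD (s0 :: t0 :: u :: us) (((s0 :: t0 :: u :: us).length : Int) - 2) 0
              = (s0 :: t0 :: u :: us)[(s0 :: t0 :: u :: us).length - 2]'(by omega) := by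
            rw [PySem.List.pyGetD_eq_getElem (s0 :: t0 :: u :: us) 0
              (by omega) (by omega)]
            congr 1
            omega
          have := hrm.2 _ (List.mem_map.mpr ⟨_, hmem, hval⟩)
          exact this
    -- assemble
    have hchain := hfull
    rw [hsplit, List.foldl_append] at hchain
    simp only [List.foldl_cons, List.foldl_nil] at hchain
    rw [hnoop] at hchain
    exact hchain

lemma runMax_attained (s : List Int) (c : Int) (l : List Int) :
    runMax s c l = c ∨ ∃ x ∈ l, cnt s x = runMax s c l := by
  have h := PySem.List.foldl_max_mem (l.map (cnt s)) c
  rw [List.foldl_map] at h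
  rcases h with h | h
  · exact Or.inl h
  · rcases List.mem_map.mp h with ⟨x, hx, hv⟩
    exact Or.inr ⟨x, hx, hv⟩

def IsBest (s : List Int) (r : Int) : Prop :=
  r ∈ s ∧ (∀ y ∈ s, List.count y s ≤ List.count r s) ∧
    (∀ y ∈ s, List.count y s = List.count r s → r ≤ y)

lemma isBest_unique {s : List Int} {r₁ r₂ : Int}
    (h₁ : IsBest s r₁) (h₂ : IsBest s r₂) : r₁ = r₂ := by
  have hc : List.count r₂ s = List.count r₁ s :=
    le_antisymm (h₁.2.1 r₂ h₂.1) (h₂.2.1 r₁ h₁.1)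
  exact le_antisymm (h₁.2.2 r₂ h₂.1 hc) (h₂.2.2 r₁ h₁.1 hc.symm)

lemma amazon_eq_fold (a : List Int) :
    amazon a = (((PySem.List.pyRange 1
        (PySem.List.len (PySem.List.sorted a (fun x => x)) - 1)).foldl
        (fun st i => stepF (PySem.List.sorted a (fun x => x)) st
            (PySem.List.pyGetD (PySem.List.sorted a (fun x => x)) i 0))
        (cnt (PySem.List.sorted a (fun x => x))
           (PySem.List.pyGetD (PySem.List.sorted a (fun x => x)) 0 0),
         PySem.List.pyGetD (PySem.List.sorted a (fun x => x)) 0 0)).2) := by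
  simp only [amazon, stepF, cnt, PySem.List.count_eq, ite_self]

lemma amazon_isBest (a : List Int) (h : a ≠ []) :
    IsBest (PySem.List.sorted a (fun x => x)) (amazon a) := by
  obtain ⟨s0, t, hs⟩ : ∃ s0 t, PySem.List.sorted a (fun x => x) = s0 :: t := by
    cases hq : PySem.List.sorted a (fun x => x) with
    | nil => exact absurd ((PySem.List.sorted_eq_nil_iff a _ false).mp hq) h
    | cons y ys => exact ⟨y, ys, rfl⟩
  have hp : (s0 :: t).Pairwise (· ≤ ·) := by
    have hq := PySem.List.sorted_pairwise a (fun x => x)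
    rw [hs] at hq; simpa using hq
  have h0 : PySem.List.pyGetD (s0 :: t) 0 0 = s0 := by
    rw [PySem.List.pyGetD_ofNat']; rfl
  have ha : amazon a = (t.foldl (stepF (s0 :: t)) (cnt (s0 :: t) s0, s0)).2 := by
    rw [amazon_eq_fold a, hs, h0, fold_range_eq s0 t hp]
  rw [hs, ha, foldl_stepF_closed (s0 :: t) t (cnt (s0 :: t) s0) s0 _ rfl]
  have hrm := runMax_le (s0 :: t) (cnt (s0 :: t) s0) t
  have hallle : ∀ y ∈ (s0 :: t), cnt (s0 :: t) y ≤ runMax (s0 :: t) (cnt (s0 :: t) s0) t := by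
    intro y hy
    rcases List.mem_cons.mp hy with rfl | hyt
    · exact hrm.1
    · exact hrm.2 y hyt
  by_cases hMc : runMax (s0 :: t) (cnt (s0 :: t) s0) t ≤ cnt (s0 :: t) s0
  · rw [if_pos hMc]
    refine ⟨by simp, ?_, ?_⟩
    · intro y hy
      have hle := le_trans (hallle y hy) hMc
      simp only [cnt] at hle
      exact_mod_cast hle
    · intro y hy _
      rcases List.mem_cons.mp hy with rfl | hyt
      · exact le_refl _
      · exact (List.pairwise_cons.mp hp).1 y hyt
  · rw [if_neg hMc]
    cases hft : t.filter (fun x => decide (runMax (s0 :: t) (cnt (s0 :: t) s0) t ≤ cnt (s0 :: t) x)) with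
    | nil =>
      exfalso
      rcases runMax_attained (s0 :: t) (cnt (s0 :: t) s0) t with hA | ⟨y, hy, hv⟩
      · exact hMc hA.le
      · have hmem : y ∈ t.filter (fun x => decide (runMax (s0 :: t) (cnt (s0 :: t) s0) t ≤ cnt (s0 :: t) x)) :=
          List.mem_filter.mpr ⟨hy, by simpa using hv.ge⟩
        rw [hft] at hmem
        exact absurd hmem (List.not_mem_nil)
    | cons z zs =>
      simp only [List.headD_cons]
      have hzmem : z ∈ t.filter (fun x => decide (runMax (s0 :: t) (cnt (s0 :: t) s0) t ≤ cnt (s0 :: t) x)) := by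
        rw [hft]; exact List.mem_cons_self
      have hz := List.mem_filter.mp hzmem
      have hzle : runMax (s0 :: t) (cnt (s0 :: t) s0) t ≤ cnt (s0 :: t) z := by
        simpa using hz.2
      have hzcnt : cnt (s0 :: t) z = runMax (s0 :: t) (cnt (s0 :: t) s0) t :=
        le_antisymm (hrm.2 z hz.1) hzle
      refine ⟨List.mem_cons_of_mem _ hz.1, ?_, ?_⟩
      · intro y hy
        have hle : cnt (s0 :: t) y ≤ cnt (s0 :: t) z := by
          rw [hzcnt]; exact hallle y hy
        simp only [cnt] at hle
        exact_mod_cast hle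
      · intro y hy hcy
        have hcyI : cnt (s0 :: t) y = runMax (s0 :: t) (cnt (s0 :: t) s0) t := by
          rw [← hzcnt]; simp only [cnt, hcy]
        rcases List.mem_cons.mp hy with rfl | hyt
        · exact absurd (hcyI ▸ le_refl _) hMc
        · have hymem : y ∈ t.filter (fun x => decide (runMax (s0 :: t) (cnt (s0 :: t) s0) t ≤ cnt (s0 :: t) x)) :=
            List.mem_filter.mpr ⟨hyt, by simpa using hcyI.ge⟩
          rw [hft] at hymem
          have hpf : (z :: zs).Pairwise (· ≤ ·) := by
            rw [← hft]
            exact List.Pairwise.filter _ (List.pairwise_cons.mp hp).2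
          rcases List.mem_cons.mp hymem with rfl | hyzs
          · exact le_refl _
          · exact (List.pairwise_cons.mp hpf).1 y hyzs

lemma alt_isBest (a : List Int) (h : a ≠ []) :
    IsBest (PySem.List.sorted a (fun x => x)) (amazon_alt a) := by
  obtain ⟨s0, t, hs⟩ : ∃ s0 t, PySem.List.sorted a (fun x => x) = s0 :: t := by
    cases hq : PySem.List.sorted a (fun x => x) with
    | nil => exact absurd ((PySem.List.sorted_eq_nil_iff a _ false).mp hq) h
    | cons y ys => exact ⟨y, ys, rfl⟩
  have halt : amazon_alt a
      = (PySem.List.min? ((PySem.Dict.keys (PySem.Dict.counter (s0 :: t))).filter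
          (fun v => PySem.Dict.getD (PySem.Dict.counter (s0 :: t)) v 0
            == (PySem.List.max? (PySem.Dict.values (PySem.Dict.counter (s0 :: t))) (fun v => v)).getD 0))
          (fun v => v)).getD 0 := by
    simp only [amazon_alt, hs, PySem.Dict.foldl_insert_getD_add_one_eq_counter]
  rw [hs, halt]
  have hkeys : (PySem.Dict.counter (s0 :: t)).keys = PySem.Set.ofList (s0 :: t) :=
    PySem.Dict.keys_counter _
  have hvals : (PySem.Dict.counter (s0 :: t)).values
      = ((PySem.Dict.counter (s0 :: t)).keys).map (fun k => (PySem.Dict.counter (s0 :: t)).getD k 0) :=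
    PySem.Dict.values_eq_map_keys _ (PySem.Dict.nodup_keys_counter _) 0
  have hs0k : s0 ∈ (PySem.Dict.counter (s0 :: t)).keys := by
    rw [hkeys]; exact (PySem.Set.mem_ofList _ _).mpr (by simp)
  obtain ⟨m, hm⟩ : ∃ m, PySem.List.max? ((PySem.Dict.counter (s0 :: t)).values) (fun v => v) = some m := by
    cases hmx : PySem.List.max? ((PySem.Dict.counter (s0 :: t)).values) (fun v => v) with
    | none =>
      exfalso
      have hnil := (PySem.List.max?_eq_none_iff _ _).mp hmx
      rw [hvals] at hnil
      have := List.map_eq_nil_iff.mp hnil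
      rw [this] at hs0k
      exact absurd hs0k (List.not_mem_nil)
    | some m => exact ⟨m, rfl⟩
  rw [hm]
  simp only [Option.getD_some]
  have hmax := PySem.List.max?_isMax hm
  have hmmem := PySem.List.max?_mem hm
  have hcnt_le : ∀ y ∈ (s0 :: t), ((List.count y (s0 :: t) : Int)) ≤ m := by
    intro y hy
    have hyk : y ∈ (PySem.Dict.counter (s0 :: t)).keys := by
      rw [hkeys]; exact (PySem.Set.mem_ofList _ _).mpr hy
    have hmem : (PySem.Dict.counter (s0 :: t)).getD y 0 ∈ (PySem.Dict.counter (s0 :: t)).values := by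
      rw [hvals]; exact List.mem_map.mpr ⟨y, hyk, rfl⟩
    have hle := hmax _ hmem
    rw [PySem.Dict.getD_counter] at hle
    exact hle
  obtain ⟨k, hk_keys, hk⟩ : ∃ k ∈ (PySem.Dict.counter (s0 :: t)).keys,
      (PySem.Dict.counter (s0 :: t)).getD k 0 = m := by
    rw [hvals] at hmmem
    rcases List.mem_map.mp hmmem with ⟨k, hk1, hk2⟩
    exact ⟨k, hk1, hk2⟩
  have hkC : k ∈ (PySem.Dict.counter (s0 :: t)).keys.filter
      (fun v => PySem.Dict.getD (PySem.Dict.counter (s0 :: t)) v 0 == m) := by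
    refine List.mem_filter.mpr ⟨hk_keys, ?_⟩
    simp [hk]
  obtain ⟨r, hr⟩ : ∃ r, PySem.List.min? ((PySem.Dict.counter (s0 :: t)).keys.filter
      (fun v => PySem.Dict.getD (PySem.Dict.counter (s0 :: t)) v 0 == m)) (fun v => v) = some r := by
    cases hmn : PySem.List.min? ((PySem.Dict.counter (s0 :: t)).keys.filter
        (fun v => PySem.Dict.getD (PySem.Dict.counter (s0 :: t)) v 0 == m)) (fun v => v) with
    | none =>
      exfalso
      have hnil := (PySem.List.min?_eq_none_iff _ _).mp hmn
      rw [hnil] at hkC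
      exact absurd hkC (List.not_mem_nil)
    | some r => exact ⟨r, rfl⟩
  rw [hr]
  simp only [Option.getD_some]
  have hrC := PySem.List.min?_mem hr
  have hrmin := PySem.List.min?_isMin hr
  have hrk := List.mem_filter.mp hrC
  have hrcount : ((List.count r (s0 :: t) : Int)) = m := by
    have := hrk.2
    rw [beq_iff_eq] at this
    rw [← PySem.Dict.getD_counter]
    exact this
  refine ⟨?_, ?_, ?_⟩
  · have := hrk.1
    rw [hkeys] at this
    exact (PySem.Set.mem_ofList _ _).mp this
  · intro y hy
    have hle := hcnt_le y hy
    rw [← hrcount] at hle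
    exact_mod_cast hle
  · intro y hy hcy
    have hyk : y ∈ (PySem.Dict.counter (s0 :: t)).keys := by
      rw [hkeys]; exact (PySem.Set.mem_ofList _ _).mpr hy
    have hyC : y ∈ (PySem.Dict.counter (s0 :: t)).keys.filter
        (fun v => PySem.Dict.getD (PySem.Dict.counter (s0 :: t)) v 0 == m) := by
      refine List.mem_filter.mpr ⟨hyk, ?_⟩
      rw [PySem.Dict.getD_counter]
      have : ((List.count y (s0 :: t) : Int)) = m := by
        rw [hcy]; exact hrcount
      simp [this]
    exact hrmin y hyC

-- ===== VERDICT (by name: the statement is the Claim_ definition above) =====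
theorem amazon_spec : Claim_equal_amazon := by
  intro a _ hpre
  unfold Spec_amazon
  exact isBest_unique (amazon_isBest a hpre) (alt_isBest a hpre)
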